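-- pv_equiv track=rewrite | github.com/AlgoRythmTech/Spectr_AI | backend/ai_engine.py | _prioritize_context
-- ===== SOURCE A (Python) =====
-- def _prioritize_context(context_parts: list, max_chars: int = 45000) -> str:
--     """Smart context assembly with priority ordering.
--
--     Priority: Tool results > Statute DB > Case law > Matter context > Company data > Web research
--     Truncates lower-priority context when approaching limits.
--     """
--     if not context_parts:
--         return "No external data retrieved for this query."
--
--     full = "\n".join(context_parts)
--     if len(full) <= max_chars:
--         return full
--
--     # Need to truncate — prioritize by source type
--     priority_order = [
--         "TOOL EXECUTION RESULTS",     # Highest — verified platform data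
--         "RELEVANT STATUTE SECTIONS",   # Authoritative DB records
--         "MATTER CONTEXT",              # User's specific case
--         "FIRM STYLE GUIDE",            # Firm preferences
--         "RETRIEVED CASE LAW",          # Live API results
--         "COMPANY DATA",                # Financial data
--         "WEB RESEARCH",                # Lowest — supplementary
--     ]
--
--     # Group context parts by priority
--     grouped = {p: [] for p in priority_order}
--     grouped["OTHER"] = []
--
--     for part in context_parts:
--         placed = False
--         for priority_key in priority_order:
--             if priority_key in part:
--                 grouped[priority_key].append(part)
--                 placed = True
--                 break
--         if not placed:
--             grouped["OTHER"].append(part)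
--
--     # Reassemble with budget
--     result = []
--     remaining = max_chars
--
--     for key in priority_order + ["OTHER"]:
--         for part in grouped[key]:
--             if len(part) <= remaining:
--                 result.append(part)
--                 remaining -= len(part)
--             elif remaining > 500:
--                 # Truncate this part to fit
--                 result.append(part[:remaining - 50] + "\n... [context truncated for token budget]")
--                 remaining = 0
--             # else: skip entirely
--
--     return "\n".join(result)
-- ===== SOURCE B (Python) =====
-- def _prioritize_context(context_parts: list, max_chars: int = 45000) -> str:
--     """Same behaviour as A, via one stable sort by priority rank instead of dict buckets."""
--     if not context_parts:
--         return "No external data retrieved for this query."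
--
--     full = "\n".join(context_parts)
--     if len(full) <= max_chars:
--         return full
--
--     priority_order = [
--         "TOOL EXECUTION RESULTS",
--         "RELEVANT STATUTE SECTIONS",
--         "MATTER CONTEXT",
--         "FIRM STYLE GUIDE",
--         "RETRIEVED CASE LAW",
--         "COMPANY DATA",
--         "WEB RESEARCH",
--     ]
--
--     def rank(part):
--         for i, key in enumerate(priority_order):
--             if key in part:
--                 return i
--         return len(priority_order)
--
--     result = []
--     remaining = max_chars
--     for part in sorted(context_parts, key=rank):
--         if len(part) <= remaining:
--             result.append(part)
--             remaining -= len(part)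
--         elif remaining > 500:
--             result.append(part[:remaining - 50] + "\n... [context truncated for token budget]")
--             remaining = 0
--
--     return "\n".join(result)
-- ===== Notes on version B (the rewrite author's own statement) =====
-- stated objective: simpler
-- what changed: Replaces the dict-of-buckets grouping (build 8 priority buckets, then iterate them in order) with a single stable sort of the parts by their priority rank followed by one budget pass; Python's stable sort reproduces the bucket order exactly.
import Mathlib
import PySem

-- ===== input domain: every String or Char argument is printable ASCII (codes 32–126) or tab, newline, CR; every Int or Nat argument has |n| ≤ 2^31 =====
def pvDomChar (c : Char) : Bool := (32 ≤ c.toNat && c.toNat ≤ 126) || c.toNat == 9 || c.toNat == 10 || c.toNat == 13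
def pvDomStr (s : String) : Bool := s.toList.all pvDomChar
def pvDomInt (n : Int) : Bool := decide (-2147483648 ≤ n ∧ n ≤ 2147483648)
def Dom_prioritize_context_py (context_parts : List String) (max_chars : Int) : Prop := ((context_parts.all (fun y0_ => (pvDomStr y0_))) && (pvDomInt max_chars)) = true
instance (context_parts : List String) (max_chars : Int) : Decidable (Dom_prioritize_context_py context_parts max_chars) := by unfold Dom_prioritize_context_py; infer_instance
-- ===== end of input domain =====

-- B replaces A's dict-of-buckets grouping by one stable sort of the parts by priority rank
-- followed by the same single budget pass (objective: simpler; same return value).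

-- ===== PORT A =====

def pvPrios : List String :=
  ["TOOL EXECUTION RESULTS", "RELEVANT STATUTE SECTIONS", "MATTER CONTEXT",
   "FIRM STYLE GUIDE", "RETRIEVED CASE LAW", "COMPANY DATA", "WEB RESEARCH"]

-- A's inner 'for priority_key in priority_order: if priority_key in part: … break' / 'placed' flag:
-- returns the bucket key ("OTHER" when no priority key matches)
def pvFirstKey : List String → String → String
  | [], _ => "OTHER"
  | p :: ps, part => if PySem.Str.isIn p part then p else pvFirstKey ps part

-- the shared body of the budget loop ('if len(part) <= remaining … elif remaining > 500 … else skip'),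
-- state = (result, remaining); both Pythons contain this loop body verbatim
def pvBudgetStep (acc : List String × Int) (part : String) : List String × Int :=
  if PySem.Str.len part ≤ acc.2 then (acc.1 ++ [part], acc.2 - PySem.Str.len part)
  else if acc.2 > 500 then
    (acc.1 ++ [PySem.Str.slice part none (some (acc.2 - 50)) ++ "\n... [context truncated for token budget]"], 0)
  else acc

-- grouped = {p: [] for p in priority_order}; grouped["OTHER"] = []
def pvGrouped0 : PySem.Dict String (List String) :=
  (PySem.Dict.ofList (pvPrios.map (fun p => (p, ([] : List String))))).insert "OTHER" []

def prioritize_context_py (context_parts : List String) (max_chars : Int) : String :=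
  if context_parts = [] then "No external data retrieved for this query."
  else
    let full := PySem.Str.join "\n" context_parts
    if PySem.Str.len full ≤ max_chars then full
    else
      let grouped := context_parts.foldl
        (fun d part => d.modify (pvFirstKey pvPrios part) [] (· ++ [part])) pvGrouped0
      let pair := (pvPrios ++ ["OTHER"]).foldl
        (fun acc key => (grouped.getD key []).foldl pvBudgetStep acc) ([], max_chars)
      PySem.Str.join "\n" pair.1

-- ===== PORT B =====

-- B's rank(part): index of the first matching priority key, else len(priority_order)
-- (the enumerate counter is the accumulator i)
def pvRankAux : List String → String → Int → Int
  | [], _, i => i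
  | p :: ps, part, i => if PySem.Str.isIn p part then i else pvRankAux ps part (i + 1)

def prioritize_context_py_alt (context_parts : List String) (max_chars : Int) : String :=
  if context_parts = [] then "No external data retrieved for this query."
  else
    let full := PySem.Str.join "\n" context_parts
    if PySem.Str.len full ≤ max_chars then full
    else
      let ordered := PySem.List.sorted context_parts (fun part => pvRankAux pvPrios part 0) false
      let pair := ordered.foldl pvBudgetStep ([], max_chars)
      PySem.Str.join "\n" pair.1

-- ===== PRECONDITION & SPEC =====
def Spec_prioritize_context_py (context_parts : List String) (max_chars : Int) (out : String) : Prop := out = prioritize_context_py_alt context_parts max_chars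
instance (context_parts : List String) (max_chars : Int) (out : String) : Decidable (Spec_prioritize_context_py context_parts max_chars out) := by unfold Spec_prioritize_context_py; infer_instance

-- ===== CLAIM (what is proved, stated in full; the proofs are below) =====
def Claim_equal_prioritize_context_py : Prop := ∀ (context_parts : List String) (max_chars : Int), Dom_prioritize_context_py context_parts max_chars → Spec_prioritize_context_py context_parts max_chars (prioritize_context_py context_parts max_chars)

-- ===== LEMMAS AND PROOFS =====

-- pure (Nat) rank of a part: index of the first matching priority key, prios.length if none
def pvRankN : List String → String → Nat
  | [], _ => 0
  | p :: ps, part => if PySem.Str.isIn p part then 0 else pvRankN ps part + 1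

theorem pvRankAux_eq (prios : List String) (part : String) :
    ∀ i : Int, pvRankAux prios part i = i + (pvRankN prios part : Int) := by
  induction prios with
  | nil => intro i; simp [pvRankAux, pvRankN]
  | cons p ps ih =>
      intro i
      simp only [pvRankAux, pvRankN]
      split
      · simp
      · rw [ih]; push_cast; ring

theorem pvRankN_le (prios : List String) (part : String) :
    pvRankN prios part ≤ prios.length := by
  induction prios with
  | nil => simp [pvRankN]
  | cons p ps ih => simp only [pvRankN, List.length_cons]; split <;> omega

-- insertBy walks past elements it is not 'before'
theorem pvInsertBy_pass {α : Type} (bf : α → α → Bool) (x : α) :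
    ∀ (ys zs : List α), (∀ y ∈ ys, bf x y = false) →
      PySem.List.insertBy bf x (ys ++ zs) = ys ++ PySem.List.insertBy bf x zs := by
  intro ys
  induction ys with
  | nil => simp
  | cons y ys ih =>
      intro zs h
      have hy : bf x y = false := h y (by simp)
      simp only [List.cons_append, PySem.List.insertBy, hy, Bool.false_eq_true, if_false]
      rw [ih zs (fun y hy' => h y (by simp [hy']))]

theorem pvInsertBy_front {α : Type} (bf : α → α → Bool) (x : α) :
    ∀ (zs : List α), (∀ z ∈ zs, bf x z = true) →
      PySem.List.insertBy bf x zs = x :: zs := by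
  intro zs h
  cases zs with
  | nil => rfl
  | cons z zs => simp [PySem.List.insertBy, h z (by simp)]

-- inserting x into a concatenation of rank buckets appends it to its own bucket
theorem pvInsertBy_flatMap {α : Type} (key : α → Int) (x : α) (L L' : Int → List α)
    (hL : ∀ r, ∀ a ∈ L r, key a = r) :
    ∀ rs : List Int, rs.Pairwise (· < ·) → key x ∈ rs →
      (∀ r ∈ rs, L' r = L r ++ if key x = r then [x] else []) →
      PySem.List.insertBy (fun a b => decide (key a < key b)) x (rs.flatMap L) = rs.flatMap L' := by
  intro rs
  induction rs with
  | nil => intro _ hmem _; simp at hmem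
  | cons r rs ih =>
      intro hp hmem hL'
      rcases List.pairwise_cons.mp hp with ⟨hlt, hp'⟩
      by_cases hr : key x = r
      · -- x belongs to this first bucket; the rest is strictly greater
        have h1 : ∀ y ∈ L r, (fun a b => decide (key a < key b)) x y = false := by
          intro y hy; simp [hL r y hy, hr]
        have h2 : ∀ z ∈ rs.flatMap L, (fun a b => decide (key a < key b)) x z = true := by
          intro z hz
          rcases List.mem_flatMap.mp hz with ⟨r', hr', hz'⟩
          simp [hL r' z hz', hr, hlt r' hr']
        rw [List.flatMap_cons, pvInsertBy_pass _ _ _ _ h1, pvInsertBy_front _ _ _ h2]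
        rw [List.flatMap_cons]
        have : L' r = L r ++ [x] := by rw [hL' r (by simp)]; simp [hr]
        rw [this]
        have : rs.flatMap L' = rs.flatMap L := by
          apply List.flatMap_congr  -- placeholder; fixed below if name differs
          intro r' hr'
          rw [hL' r' (by simp [hr'])]
          have : ¬ key x = r' := by
            have := hlt r' hr'; omega
          simp [this]
        rw [this]; simp
      · -- x is not in the first bucket, which it passes
        have hmem' : key x ∈ rs := by
          rcases List.mem_cons.mp hmem with h | h
          · exact absurd h hr
          · exact h
        have hrlt : r < key x := hlt (key x) hmem'
        have h1 : ∀ y ∈ L r, (fun a b => decide (key a < key b)) x y = false := by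
          intro y hy
          simp only [hL r y hy, decide_eq_false_iff_not]
          omega
        rw [List.flatMap_cons, pvInsertBy_pass _ _ _ _ h1,
            ih hp' hmem' (fun r' hr' => hL' r' (by simp [hr']))]
        rw [List.flatMap_cons]
        have : L' r = L r := by
          rw [hL' r (by simp)]; simp [hr]
        rw [this]

-- the stable sort by an Int-valued rank is the concatenation of the rank buckets
theorem pvSorted_flatMap {α : Type} (key : α → Int) (rs : List Int)
    (hp : rs.Pairwise (· < ·)) :
    ∀ xs : List α, (∀ a ∈ xs, key a ∈ rs) →
      PySem.List.sorted xs key false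
        = rs.flatMap (fun r => xs.filter (fun a => decide (key a = r))) := by
  intro xs
  induction xs using List.reverseRecOn with
  | nil => intro _; simp [PySem.List.sorted]
  | append_singleton xs x ih =>
      intro hmem
      rw [PySem.List.sorted_eq_foldl_insertBy, List.foldl_append]
      rw [← PySem.List.sorted_eq_foldl_insertBy]
      simp only [List.foldl_cons, List.foldl_nil]
      rw [ih (fun a ha => hmem a (by simp [ha]))]
      refine pvInsertBy_flatMap key x _ _ ?_ rs hp (hmem x (by simp)) ?_
      · intro r a ha
        simp only [List.mem_filter] at ha
        exact of_decide_eq_true ha.2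
      · intro r _
        rw [List.filter_append]
        congr 1
        by_cases h : key x = r <;> simp [h]

-- the grouping loop: bucket k holds exactly the parts whose first key is k, in order
theorem pvGetD_group (keyOf : String → String) :
    ∀ (parts : List String) (d : PySem.Dict String (List String)) (k : String),
      (parts.foldl (fun d part => d.modify (keyOf part) [] (· ++ [part])) d).getD k []
        = d.getD k [] ++ parts.filter (fun p => keyOf p == k) := by
  intro parts
  induction parts with
  | nil => intro d k; simp
  | cons p ps ih =>
      intro d k
      simp only [List.foldl_cons, List.filter_cons]
      rw [ih]
      rw [PySem.Dict.getD_modify]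
      by_cases h : keyOf p = k
      · simp [h]
      · simp [h, Ne.symm h]

theorem pvGrouped0_getD (k : String) : pvGrouped0.getD k [] = [] := by
  cases h : pvGrouped0.get? k with
  | none => rw [PySem.Dict.getD_eq_get?_getD, h]; rfl
  | some v =>
      have hv : (k, v) ∈ pvGrouped0.items := PySem.Dict.mem_items_of_get?_eq_some pvGrouped0 h
      have hit : pvGrouped0.items = (pvPrios.map (fun p => (p, ([] : List String)))) ++ [("OTHER", [])] := by decide
      rw [hit] at hv
      have hv' : v = [] := by
        rcases List.mem_append.mp hv with h' | h'
        · rcases List.mem_map.mp h' with ⟨p, _, hp⟩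
          exact (congrArg Prod.snd hp).symm
        · simp at h'
          exact h'.2
      rw [PySem.Dict.getD_eq_get?_getD, h, hv']; rfl

-- nested budget loop over buckets = one budget loop over their concatenation
theorem pvFoldl_flatMap {α β σ : Type} (g : β → List α) (f : σ → α → σ) :
    ∀ (rs : List β) (init : σ),
      rs.foldl (fun s r => (g r).foldl f s) init = (rs.flatMap g).foldl f init := by
  intro rs
  induction rs with
  | nil => intro init; simp
  | cons r rs ih => intro init; simp only [List.foldl_cons, List.flatMap_cons, List.foldl_append]; exact ih _

-- pointwise: "first key is the i-th key" = "rank is i"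
theorem pvPointwise (p : String) (i : Nat) (hi : i < 8) :
    (pvFirstKey pvPrios p == (pvPrios ++ ["OTHER"]).getD i "OTHER")
      = decide (pvRankAux pvPrios p 0 = (i : Int)) := by
  rw [pvRankAux_eq]
  have h7 : pvRankN pvPrios p ≤ 7 := by
    have := pvRankN_le pvPrios p; simpa [pvPrios] using this
  simp only [zero_add, Int.natCast_inj]
  have key_eq : pvFirstKey pvPrios p = (pvPrios ++ ["OTHER"]).getD (pvRankN pvPrios p) "OTHER" := by
    have : ∀ (prios : List String) (q : String),
        pvFirstKey prios q = (prios ++ ["OTHER"]).getD (pvRankN prios q) "OTHER" := by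
      intro prios
      induction prios with
      | nil => intro q; simp [pvFirstKey, pvRankN]
      | cons a as ih => intro q; simp only [pvFirstKey, pvRankN]; split <;> simp [ih]
    exact this pvPrios p
  rw [key_eq]
  set n := pvRankN pvPrios p with hn
  have hnd : (pvPrios ++ ["OTHER"]).Nodup := by decide
  have hlen : (pvPrios ++ ["OTHER"]).length = 8 := by decide
  rcases Nat.lt_or_ge n 8 with hn8 | hn8
  · by_cases hni : n = i
    · simp [hni]
    · have hne : (pvPrios ++ ["OTHER"]).getD n "OTHER" ≠ (pvPrios ++ ["OTHER"]).getD i "OTHER" := by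
        rw [List.getD_eq_getElem _ _ (by omega), List.getD_eq_getElem _ _ (by omega)]
        intro hcon
        exact hni ((List.Nodup.getElem_inj_iff hnd).mp hcon)
      rw [beq_eq_false_iff_ne.mpr hne, eq_comm, decide_eq_false_iff_not]
      exact hni
  · omega

theorem pvBucket_eq (parts : List String) :
    (pvPrios ++ ["OTHER"]).flatMap (fun k => parts.filter (fun p => pvFirstKey pvPrios p == k))
      = ([0, 1, 2, 3, 4, 5, 6, 7] : List Int).flatMap
          (fun r => parts.filter (fun p => decide (pvRankAux pvPrios p 0 = r))) := by
  have h : ∀ (i : Nat), i < 8 → ∀ (k : String), (pvPrios ++ ["OTHER"]).getD i "OTHER" = k →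
      ∀ (ri : Int), (i : Int) = ri →
      parts.filter (fun p => pvFirstKey pvPrios p == k)
        = parts.filter (fun p => decide (pvRankAux pvPrios p 0 = ri)) := by
    intro i hi k hk ri hri
    subst hk; subst hri
    exact List.filter_congr (fun p _ => pvPointwise p i hi)
  rw [show pvPrios ++ ["OTHER"]
      = ["TOOL EXECUTION RESULTS", "RELEVANT STATUTE SECTIONS", "MATTER CONTEXT",
         "FIRM STYLE GUIDE", "RETRIEVED CASE LAW", "COMPANY DATA", "WEB RESEARCH", "OTHER"] from rfl]
  simp only [List.flatMap_cons, List.flatMap_nil, List.append_nil]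
  rw [h 0 (by omega) "TOOL EXECUTION RESULTS" (by decide) 0 (by norm_num),
      h 1 (by omega) "RELEVANT STATUTE SECTIONS" (by decide) 1 (by norm_num),
      h 2 (by omega) "MATTER CONTEXT" (by decide) 2 (by norm_num),
      h 3 (by omega) "FIRM STYLE GUIDE" (by decide) 3 (by norm_num),
      h 4 (by omega) "RETRIEVED CASE LAW" (by decide) 4 (by norm_num),
      h 5 (by omega) "COMPANY DATA" (by decide) 5 (by norm_num),
      h 6 (by omega) "WEB RESEARCH" (by decide) 6 (by norm_num),
      h 7 (by omega) "OTHER" (by decide) 7 (by norm_num)]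

theorem pvMain (parts : List String) (mc : Int) :
    (pvPrios ++ ["OTHER"]).foldl
        (fun acc key =>
          ((parts.foldl (fun d part => d.modify (pvFirstKey pvPrios part) [] (· ++ [part]))
              pvGrouped0).getD key []).foldl pvBudgetStep acc)
        ([], mc)
      = (PySem.List.sorted parts (fun part => pvRankAux pvPrios part 0) false).foldl
          pvBudgetStep ([], mc) := by
  rw [pvFoldl_flatMap]
  have hbuckets : (pvPrios ++ ["OTHER"]).flatMap
      (fun k => (parts.foldl (fun d part => d.modify (pvFirstKey pvPrios part) [] (· ++ [part]))
          pvGrouped0).getD k [])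
      = PySem.List.sorted parts (fun part => pvRankAux pvPrios part 0) false := by
    have h1 : ∀ k, (parts.foldl (fun d part => d.modify (pvFirstKey pvPrios part) [] (· ++ [part]))
        pvGrouped0).getD k [] = parts.filter (fun p => pvFirstKey pvPrios p == k) := by
      intro k
      rw [pvGetD_group (pvFirstKey pvPrios) parts pvGrouped0 k, pvGrouped0_getD]
      simp
    have h2 : ∀ a ∈ parts, pvRankAux pvPrios a 0 ∈ ([0, 1, 2, 3, 4, 5, 6, 7] : List Int) := by
      intro a _
      rw [pvRankAux_eq]
      have := pvRankN_le pvPrios a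
      have h7 : pvRankN pvPrios a ≤ 7 := by simpa [pvPrios] using this
      have : (0 : Int) ≤ (pvRankN pvPrios a : Int) ∧ (pvRankN pvPrios a : Int) ≤ 7 := by
        constructor <;> [positivity; exact_mod_cast h7]
      simp only [zero_add, List.mem_cons]
      omega
    rw [pvSorted_flatMap _ ([0, 1, 2, 3, 4, 5, 6, 7] : List Int) (by decide) parts h2]
    simp only [h1]
    exact pvBucket_eq parts
  rw [hbuckets]

-- ===== VERDICT (by name: the statement is the Claim_ definition above) =====
theorem prioritize_context_py_spec : Claim_equal_prioritize_context_py := by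
  intro parts mc _
  unfold Spec_prioritize_context_py prioritize_context_py prioritize_context_py_alt
  by_cases h0 : parts = []
  · simp [h0]
  · rw [if_neg h0, if_neg h0]
    dsimp only
    split_ifs with h1
    · rfl
    · exact congrArg (fun l => PySem.Str.join "\n" l.1) (pvMain parts mc)
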